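-- pv_equiv track=rewrite | github.com/FriedrichFroebel/ocrodjvu | lib/unicode_support.py | simple_word_break_iterator
-- ===== SOURCE A (Python) =====
-- def simple_word_break_iterator(text):
--     '''
--     Create an instance of simple space-to-space word break iterator.
--     '''
--     if not text:
--         return
--     space = text[0].isspace()
--     for n, ch in enumerate(text):
--         if space != ch.isspace():
--             yield n
--             space = not space
--     yield len(text)
-- ===== SOURCE B (Python) =====
-- def simple_word_break_iterator(text):
--     '''
--     Create an instance of simple space-to-space word break iterator.
--     '''
--     n = len(text)
--     i = 0
--     while i < n:
--         space = text[i].isspace()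
--         j = i + 1
--         while j < n and text[j].isspace() == space:
--             j += 1
--         yield j
--         i = j
-- ===== Notes on version B (the rewrite author's own statement) =====
-- stated objective: alternative
-- what changed: B scans maximal runs of equal whitespace-status with a nested while loop and yields each run's end position, instead of A's per-character pass toggling a boolean flag and yielding at flips plus a trailing len(text).
import Mathlib
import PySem

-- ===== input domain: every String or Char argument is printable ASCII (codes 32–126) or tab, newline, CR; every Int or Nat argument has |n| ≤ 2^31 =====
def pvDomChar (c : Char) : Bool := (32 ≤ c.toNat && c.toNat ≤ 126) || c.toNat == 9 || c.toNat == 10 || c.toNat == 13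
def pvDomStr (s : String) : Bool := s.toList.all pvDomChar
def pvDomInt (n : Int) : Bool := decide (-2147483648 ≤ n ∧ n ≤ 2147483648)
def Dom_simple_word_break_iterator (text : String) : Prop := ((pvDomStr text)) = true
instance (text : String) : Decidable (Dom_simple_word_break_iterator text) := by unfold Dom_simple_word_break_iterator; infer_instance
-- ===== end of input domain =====

-- B scans maximal runs of equal whitespace-status (nested-loop run scan) instead of A's per-char flag toggle; alternative decomposition, same cost.


-- ===== PORT A =====
-- if not text: return; space = text[0].isspace(); for n, ch in enumerate(text): …; yield len(text)
def simple_word_break_iterator (text : String) : List Int :=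
  match text.toList with
  | [] => []
  | c :: _ =>
    let st := (PySem.List.enumerate text.toList 0).foldl
      (fun (st : Bool × List Int) p =>
        if st.1 ≠ PySem.Chars.isspace p.2 then (!st.1, st.2 ++ [p.1]) else st)
      (PySem.Chars.isspace c, [])
    st.2 ++ [(text.toList.length : Int)]

-- ===== PORT B =====
-- inner while of Source B: number of further chars with the same whitespace-status
def pvRunLen (s : Bool) : List Char → Nat
  | [] => 0
  | c :: cs => if PySem.Chars.isspace c == s then pvRunLen s cs + 1 else 0

-- outer while of Source B: one step per maximal run, yielding its end position
def pvGo : List Char → Int → List Int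
  | [], _ => []
  | c :: cs, pos =>
    let k := pvRunLen (PySem.Chars.isspace c) cs
    (pos + 1 + k) :: pvGo (cs.drop k) (pos + 1 + k)
termination_by cs _ => cs.length
decreasing_by
  simp only [List.length_cons, List.length_drop]; omega

def simple_word_break_iterator_alt (text : String) : List Int :=
  pvGo text.toList 0

-- ===== PRECONDITION & SPEC =====
def Spec_simple_word_break_iterator (text : String) (out : List Int) : Prop := out = simple_word_break_iterator_alt text
instance (text : String) (out : List Int) : Decidable (Spec_simple_word_break_iterator text out) := by unfold Spec_simple_word_break_iterator; infer_instance

-- ===== CLAIM (what is proved, stated in full; the proofs are below) =====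
def Claim_equal_simple_word_break_iterator : Prop := ∀ (text : String), Dom_simple_word_break_iterator text → Spec_simple_word_break_iterator text (simple_word_break_iterator text)

-- ===== LEMMAS AND PROOFS =====

-- recursive characterisation of A's loop: current flag s, remaining chars, next index
def pvG (s : Bool) : List Char → Int → List Int
  | [], n => [n]
  | c :: cs, n =>
    if s ≠ PySem.Chars.isspace c then n :: pvG (PySem.Chars.isspace c) cs (n + 1)
    else pvG s cs (n + 1)

lemma pvGo_cons (c : Char) (cs : List Char) (pos : Int) :
    pvGo (c :: cs) pos =
      (pos + 1 + (pvRunLen (PySem.Chars.isspace c) cs : Int)) ::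
        pvGo (cs.drop (pvRunLen (PySem.Chars.isspace c) cs))
          (pos + 1 + (pvRunLen (PySem.Chars.isspace c) cs : Int)) := by
  rw [pvGo]

lemma pvFoldG (cs : List Char) (s : Bool) (acc : List Int) (n : Int) :
    ((PySem.List.enumerate cs n).foldl
      (fun (st : Bool × List Int) p =>
        if st.1 ≠ PySem.Chars.isspace p.2 then (!st.1, st.2 ++ [p.1]) else st)
      (s, acc)).2 ++ [n + cs.length] = acc ++ pvG s cs n := by
  induction cs generalizing s acc n with
  | nil => simp [PySem.List.enumerate_nil, pvG]
  | cons c cs ih =>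
    rw [PySem.List.enumerate_cons]
    have hlen : (n + ((c :: cs).length : Int)) = (n + 1) + cs.length := by
      simp only [List.length_cons]; push_cast; ring
    simp only [List.foldl_cons]
    by_cases h : s = PySem.Chars.isspace c
    · subst h
      rw [if_neg (by simp), hlen, ih]
      simp [pvG]
    · have hb : PySem.Chars.isspace c = !s := by
        cases s <;> cases hc : PySem.Chars.isspace c <;> simp_all
      rw [if_pos h, hlen, ih]
      simp [pvG, hb]

lemma pvG_eq_pvGo (cs : List Char) (s : Bool) (n : Int) :
    pvG s cs n = (n + (pvRunLen s cs : Int)) ::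
      pvGo (cs.drop (pvRunLen s cs)) (n + (pvRunLen s cs : Int)) := by
  induction cs generalizing s n with
  | nil => simp [pvG, pvRunLen, pvGo]
  | cons c cs ih =>
    by_cases h : PySem.Chars.isspace c = s
    · have hr : pvRunLen s (c :: cs) = pvRunLen s cs + 1 := by simp [pvRunLen, h]
      have hG : pvG s (c :: cs) n = pvG s cs (n + 1) := by simp [pvG, h]
      have ha : (n + ((pvRunLen s cs + 1 : Nat) : Int)) = n + 1 + pvRunLen s cs := by
        push_cast; ring
      rw [hr, hG, ih, ha, List.drop_succ_cons]
    · have hr : pvRunLen s (c :: cs) = 0 := by simp [pvRunLen, h]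
      have hG : pvG s (c :: cs) n = n :: pvG (PySem.Chars.isspace c) cs (n + 1) := by
        simp [pvG, Ne.symm h]
      rw [hr, hG, ih]
      simp only [Nat.cast_zero, add_zero, List.drop_zero]
      rw [pvGo_cons]

-- ===== VERDICT (by name: the statement is the Claim_ definition above) =====
theorem simple_word_break_iterator_spec : Claim_equal_simple_word_break_iterator := by
  intro text _
  unfold Spec_simple_word_break_iterator simple_word_break_iterator simple_word_break_iterator_alt
  cases hcs : text.toList with
  | nil => simp [pvGo]
  | cons c cs =>
    simp only
    have h0 : [(((c :: cs).length : Nat) : Int)] = [(0 : Int) + ((c :: cs).length : Nat)] := by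
      simp
    rw [h0, pvFoldG]
    simp only [List.nil_append]
    rw [show pvG (PySem.Chars.isspace c) (c :: cs) 0 = pvG (PySem.Chars.isspace c) cs 1 by
          simp [pvG],
        pvG_eq_pvGo, pvGo_cons]
    norm_num
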